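-- pv_equiv track=rewrite | github.com/notgaby/Tetris | game.py | bounds
-- ===== SOURCE A (Python) =====
-- def bounds(rectList,dir):
--    """
--    (function): -checks to make sure if you can move to the right, left, or down
--                -makes sure you don't go out of bounds of the board
--    :param rectList: Current list of rectangles
--    :param dir: Direction going (right, left, down)
--    :return: 1. goes through rectList
--             2. find the direction the player wants to go
--             3. for every rectangle, adds or subtracts x's or y's
--             > +/- in order to see if you +/- (if you were to move right for ex.)
--             and go out of bounds
--             > if you do go out of bounds, return false
--             > return false: player is out of bounds | movement invalid
--             > return true: player is not out of bounds | movement can occur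
--    """
--    for x in range(0,len(rectList)):
--        if(dir==1): #right
--            if((rectList[x][0]+40)>360):
--                return False
--        elif(dir==2): #left
--            if((rectList[x][0]-40)<0):
--                return False
--        elif(dir==3): #down
--            if((rectList[x][1]+40)>760):
--                return False
--    return True
-- ===== SOURCE B (Python) =====
-- def bounds(rectList, dir):
--     if not rectList:
--         return True
--     if dir == 1:
--         s = sorted(rectList, key=lambda r: r[0], reverse=True)
--         return s[0][0] <= 320
--     if dir == 2:
--         s = sorted(rectList, key=lambda r: r[0])
--         return s[0][0] >= 40
--     if dir == 3:
--         s = sorted(rectList, key=lambda r: r[1], reverse=True)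
--         return s[0][1] <= 720
--     return True
-- ===== Notes on version B (the rewrite author's own statement) =====
-- stated objective: alternative
-- what changed: Instead of scanning each rectangle with an inline threshold test and early return, B sorts the list by the relevant coordinate (descending for the two max-bound checks, ascending for the min-bound check) and compares only the first element of the sorted list against the bound.
import Mathlib
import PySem

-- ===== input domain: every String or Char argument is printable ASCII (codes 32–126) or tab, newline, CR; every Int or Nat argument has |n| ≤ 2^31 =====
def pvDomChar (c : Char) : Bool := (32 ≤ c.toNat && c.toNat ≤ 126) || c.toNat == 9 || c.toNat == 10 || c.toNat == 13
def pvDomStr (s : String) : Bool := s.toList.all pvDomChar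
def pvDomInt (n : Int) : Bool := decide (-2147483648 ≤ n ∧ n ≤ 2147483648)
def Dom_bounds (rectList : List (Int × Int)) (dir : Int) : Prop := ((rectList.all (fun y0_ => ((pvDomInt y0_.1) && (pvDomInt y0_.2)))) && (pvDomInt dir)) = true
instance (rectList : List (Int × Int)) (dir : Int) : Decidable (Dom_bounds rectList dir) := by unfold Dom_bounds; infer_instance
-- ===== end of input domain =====

-- B replaces A's per-rectangle early-return loop by sorting on the relevant coordinate and checking only the first (extreme) element (objective: alternative).


-- ===== PORT A =====
-- A iterates over the rectangles in order, early-returning False on the first violation.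
def boundsLoop (dir : Int) : List (Int × Int) → Bool
  | [] => true
  | r :: rs =>
    if dir == 1 then
      (if r.1 + 40 > 360 then false else boundsLoop dir rs)
    else if dir == 2 then
      (if r.1 - 40 < 0 then false else boundsLoop dir rs)
    else if dir == 3 then
      (if r.2 + 40 > 760 then false else boundsLoop dir rs)
    else boundsLoop dir rs

def bounds (rectList : List (Int × Int)) (dir : Int) : Bool :=
  boundsLoop dir rectList

-- ===== PORT B =====
-- B guards the empty list, then sorts by the relevant coordinate (reverse=True
-- for the two max-bound checks) and compares only s[0] against the bound.
def bounds_alt (rectList : List (Int × Int)) (dir : Int) : Bool :=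
  match rectList with
  | [] => true
  | _ :: _ =>
    if dir == 1 then
      match PySem.List.sorted rectList (fun r => r.1) true with
      | m :: _ => decide (m.1 ≤ 320)
      | [] => true        -- unreachable: sorted of a nonempty list is nonempty
    else if dir == 2 then
      match PySem.List.sorted rectList (fun r => r.1) false with
      | m :: _ => decide (40 ≤ m.1)
      | [] => true
    else if dir == 3 then
      match PySem.List.sorted rectList (fun r => r.2) true with
      | m :: _ => decide (m.2 ≤ 720)
      | [] => true
    else true

-- ===== PRECONDITION & SPEC =====
def Spec_bounds (rectList : List (Int × Int)) (dir : Int) (out : Bool) : Prop := out = bounds_alt rectList dir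
instance (rectList : List (Int × Int)) (dir : Int) (out : Bool) : Decidable (Spec_bounds rectList dir out) := by unfold Spec_bounds; infer_instance

-- ===== CLAIM (what is proved, stated in full; the proofs are below) =====
def Claim_equal_bounds : Prop := ∀ (rectList : List (Int × Int)) (dir : Int), Dom_bounds rectList dir → Spec_bounds rectList dir (bounds rectList dir)

-- ===== LEMMAS AND PROOFS =====

-- the per-rectangle condition both programs test, as a Prop
def okP (dir : Int) (p : Int × Int) : Prop :=
  (dir = 1 → p.1 ≤ 320) ∧ (dir = 2 → 40 ≤ p.1) ∧ (dir = 3 → p.2 ≤ 720)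

theorem boundsLoop_iff (dir : Int) :
    ∀ (l : List (Int × Int)), boundsLoop dir l = true ↔ ∀ p ∈ l, okP dir p := by
  intro l
  induction l with
  | nil => simp [boundsLoop]
  | cons r rs ih =>
    simp only [boundsLoop, List.mem_cons, forall_eq_or_imp]
    by_cases h1 : dir = 1
    · subst h1
      simp only [beq_self_eq_true, if_true]
      split_ifs with hv
      · simp only [false_iff, not_and]
        intro hr
        exact absurd (hr.1 rfl) (by omega)
      · rw [ih]
        have : okP 1 r := ⟨fun _ => by omega, fun h => absurd h (by decide),
          fun h => absurd h (by decide)⟩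
        tauto
    · by_cases h2 : dir = 2
      · subst h2
        simp only [show ((2:Int) == 1) = false by decide, Bool.false_eq_true, if_false,
          beq_self_eq_true, if_true]
        split_ifs with hv
        · simp only [false_iff, not_and]
          intro hr
          exact absurd (hr.2.1 rfl) (by omega)
        · rw [ih]
          have : okP 2 r := ⟨fun h => absurd h (by decide), fun _ => by omega,
            fun h => absurd h (by decide)⟩
          tauto
      · by_cases h3 : dir = 3
        · subst h3
          simp only [show ((3:Int) == 1) = false by decide,
            show ((3:Int) == 2) = false by decide, Bool.false_eq_true, if_false,
            beq_self_eq_true, if_true]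
          split_ifs with hv
          · simp only [false_iff, not_and]
            intro hr
            exact absurd (hr.2.2 rfl) (by omega)
          · rw [ih]
            have : okP 3 r := ⟨fun h => absurd h (by decide),
              fun h => absurd h (by decide), fun _ => by omega⟩
            tauto
        · simp only [beq_iff_eq, if_neg h1, if_neg h2, if_neg h3]
          rw [ih]
          have : okP dir r := ⟨fun h => absurd h h1, fun h => absurd h h2,
            fun h => absurd h h3⟩
          tauto

-- the head of a reverse/forward sort bounds every element: the single s[0]
-- comparison in B is equivalent to the universal per-element condition
theorem head_sorted_rev_le_iff (l : List (Int × Int)) (f : Int × Int → Int) (c : Int)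
    (m : Int × Int) (t : List (Int × Int))
    (hs : PySem.List.sorted l f true = m :: t) :
    (f m ≤ c ↔ ∀ p ∈ l, f p ≤ c) := by
  have hmax := PySem.List.key_head_sorted_rev_ge (xs := l) (key := f) hs
  have hm : m ∈ l := by
    rw [← PySem.List.mem_sorted (xs := l) (key := f) (rev := true), hs]
    exact List.mem_cons_self
  exact ⟨fun h p hp => le_trans (hmax p hp) h, fun h => h m hm⟩

theorem le_head_sorted_iff (l : List (Int × Int)) (f : Int × Int → Int) (c : Int)
    (m : Int × Int) (t : List (Int × Int))
    (hs : PySem.List.sorted l f false = m :: t) :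
    (c ≤ f m ↔ ∀ p ∈ l, c ≤ f p) := by
  have hmin := PySem.List.key_head_sorted_le (xs := l) (key := f) hs
  have hm : m ∈ l := by
    rw [← PySem.List.mem_sorted (xs := l) (key := f) (rev := false), hs]
    exact List.mem_cons_self
  exact ⟨fun h p hp => le_trans h (hmin p hp), fun h => h m hm⟩

theorem bounds_alt_iff (dir : Int) (l : List (Int × Int)) :
    bounds_alt l dir = true ↔ ∀ p ∈ l, okP dir p := by
  rcases l with _ | ⟨r, rs⟩
  · simp [bounds_alt]
  · have hne : (r :: rs : List (Int × Int)) ≠ [] := by simp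
    simp only [bounds_alt]
    by_cases h1 : dir = 1
    · subst h1
      simp only [beq_self_eq_true, if_true]
      rcases hs : PySem.List.sorted (r :: rs) (fun p => p.1) true with _ | ⟨m, t⟩
      · exact absurd ((PySem.List.sorted_eq_nil_iff _ _ _).mp hs) hne
      · simp only [decide_eq_true_eq]
        rw [head_sorted_rev_le_iff _ _ 320 m t hs]
        constructor
        · intro h p hp
          exact ⟨fun _ => h p hp, fun h2 => absurd h2 (by decide),
            fun h3 => absurd h3 (by decide)⟩
        · intro h p hp; exact (h p hp).1 rfl
    · by_cases h2 : dir = 2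
      · subst h2
        simp only [show ((2:Int) == 1) = false by decide, Bool.false_eq_true, if_false,
          beq_self_eq_true, if_true]
        rcases hs : PySem.List.sorted (r :: rs) (fun p => p.1) false with _ | ⟨m, t⟩
        · exact absurd ((PySem.List.sorted_eq_nil_iff _ _ _).mp hs) hne
        · simp only [decide_eq_true_eq]
          rw [le_head_sorted_iff _ _ 40 m t hs]
          constructor
          · intro h p hp
            exact ⟨fun h1 => absurd h1 (by decide), fun _ => h p hp,
              fun h3 => absurd h3 (by decide)⟩
          · intro h p hp; exact (h p hp).2.1 rfl
      · by_cases h3 : dir = 3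
        · subst h3
          simp only [show ((3:Int) == 1) = false by decide,
            show ((3:Int) == 2) = false by decide, Bool.false_eq_true, if_false,
            beq_self_eq_true, if_true]
          rcases hs : PySem.List.sorted (r :: rs) (fun p => p.2) true with _ | ⟨m, t⟩
          · exact absurd ((PySem.List.sorted_eq_nil_iff _ _ _).mp hs) hne
          · simp only [decide_eq_true_eq]
            rw [head_sorted_rev_le_iff _ _ 720 m t hs]
            constructor
            · intro h p hp
              exact ⟨fun h1 => absurd h1 (by decide), fun h2 => absurd h2 (by decide),
                fun _ => h p hp⟩
            · intro h p hp; exact (h p hp).2.2 rfl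
        · simp only [beq_iff_eq, if_neg h1, if_neg h2, if_neg h3, true_iff]
          exact fun p _ => ⟨fun h => absurd h h1, fun h => absurd h h2,
            fun h => absurd h h3⟩

-- ===== VERDICT (by name: the statement is the Claim_ definition above) =====
theorem bounds_spec : Claim_equal_bounds := by
  intro rectList dir _
  unfold Spec_bounds bounds
  rw [Bool.eq_iff_iff, boundsLoop_iff, bounds_alt_iff]
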